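-- pv_equiv track=rewrite | github.com/RiccardoRomeo01/CDMO-project | CPMOD/cp/utils.py | sorting_couriers
-- ===== SOURCE A (Python) =====
-- def sorting_couriers(value):
--     courier_size = value[2]
--     size_pos = {}
--     # Initialization
--     for i in range(len(courier_size)):
--         size_pos[courier_size[i]] = []
--
--     for i in range(len(courier_size)):
--         size_pos[courier_size[i]].append(i)
--
--     courier_size_copy = courier_size.copy()
--     courier_size_copy.sort(reverse=True)
--     corresponding_dict = {}
--     for i in range(len(courier_size)):
--         corresponding_dict[i] = size_pos[courier_size_copy[i]][0]
--         size_pos[courier_size_copy[i]].pop(0)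
--
--     return corresponding_dict
-- ===== SOURCE B (Python) =====
-- def sorting_couriers(value):
--     courier_size = value[2]
--     order = sorted(range(len(courier_size)), key=lambda i: courier_size[i], reverse=True)
--     return dict(enumerate(order))
-- ===== Notes on version B (the rewrite author's own statement) =====
-- stated objective: simpler
-- what changed: Replaces A's bucket-dict building, separate descending value sort and repeated pop(0) with a single stable index sort: order = sorted(range(n), key=lambda i: courier_size[i], reverse=True) and dict(enumerate(order)).
import Mathlib
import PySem

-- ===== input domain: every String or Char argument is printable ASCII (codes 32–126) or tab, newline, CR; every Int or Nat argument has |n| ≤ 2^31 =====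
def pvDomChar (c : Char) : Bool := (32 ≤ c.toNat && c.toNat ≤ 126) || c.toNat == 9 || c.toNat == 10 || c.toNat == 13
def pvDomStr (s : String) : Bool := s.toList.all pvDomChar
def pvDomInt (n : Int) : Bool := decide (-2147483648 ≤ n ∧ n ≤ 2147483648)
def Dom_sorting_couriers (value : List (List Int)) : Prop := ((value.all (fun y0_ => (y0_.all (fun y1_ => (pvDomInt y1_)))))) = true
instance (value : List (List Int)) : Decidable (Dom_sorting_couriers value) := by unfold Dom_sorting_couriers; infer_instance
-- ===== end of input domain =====

-- B replaces A's bucket-dict + value-sort + pop machinery by one stable index sort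
-- (sorted(range(n), key=…, reverse=True)) and dict(enumerate(…)); objective: simpler.

-- ===== PORT A =====
-- Literal port of A. size_pos[cs[i]] / bucket[0] / bucket.pop(0) are written with the
-- total forms getD/headD/drop: the equivalence proof shows the key is always present and
-- the bucket nonempty at every such access, so Python never raises there (exact on Pre_).
def sorting_couriers (value : List (List Int)) : List (Int × Int) :=
  match PySem.List.pyGet? value 2 with
  | none => []  -- IndexError in Python: excluded by Pre_
  | some courier_size =>
    let idx := PySem.List.pyRange 0 (courier_size.length : Int)
    let sizePos0 : PySem.Dict Int (List Int) :=
      idx.foldl (fun d i => d.insert (PySem.List.pyGetD courier_size i 0) []) PySem.Dict.empty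
    let sizePos : PySem.Dict Int (List Int) :=
      idx.foldl (fun d i => d.modify (PySem.List.pyGetD courier_size i 0) [] (fun l => l ++ [i])) sizePos0
    let copy := PySem.List.sorted courier_size (fun x => x) true
    let final := idx.foldl
      (fun (st : PySem.Dict Int Int × PySem.Dict Int (List Int)) i =>
        let v := PySem.List.pyGetD copy i 0
        let b := st.2.getD v []
        (st.1.insert i (b.headD 0), st.2.modify v [] (fun l => l.drop 1)))
      (PySem.Dict.empty, sizePos)
    final.1.items

-- ===== PORT B =====
def sorting_couriers_alt (value : List (List Int)) : List (Int × Int) :=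
  match PySem.List.pyGet? value 2 with
  | none => []  -- IndexError in Python: excluded by Pre_
  | some courier_size =>
    let order := PySem.List.sorted (PySem.List.pyRange 0 (courier_size.length : Int))
      (fun i => PySem.List.pyGetD courier_size i 0) true
    PySem.List.enumerate order

-- ===== PRECONDITION & SPEC =====
-- Pre_ excludes exactly the inputs where Python's value[2] raises IndexError (fewer than 3 rows).
def Pre_sorting_couriers (value : List (List Int)) : Prop := 2 < value.length
instance (value : List (List Int)) : Decidable (Pre_sorting_couriers value) := by
  unfold Pre_sorting_couriers; infer_instance
def pvWitness_sorting_couriers : List (List Int) := [[1], [2], [3, 1, 3]]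

def Spec_sorting_couriers (value : List (List Int)) (out : List (Int × Int)) : Prop := out = sorting_couriers_alt value
instance (value : List (List Int)) (out : List (Int × Int)) : Decidable (Spec_sorting_couriers value out) := by unfold Spec_sorting_couriers; infer_instance

-- ===== CLAIM (what is proved, stated in full; the proofs are below) =====
def Claim_equal_sorting_couriers : Prop := ∀ (value : List (List Int)), Dom_sorting_couriers value → Pre_sorting_couriers value → Spec_sorting_couriers value (sorting_couriers value)

-- ===== LEMMAS AND PROOFS =====

-- mapping a list through the key commutes with insertBy (same comparisons are made)
theorem pv_map_insertBy (f : Int → Int) (x : Int) (ys : List Int) :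
    (PySem.List.insertBy (fun a b => decide (f b < f a)) x ys).map f
      = PySem.List.insertBy (fun a b => decide (b < a)) (f x) (ys.map f) := by
  induction ys with
  | nil => simp [PySem.List.insertBy]
  | cons y t ih =>
    by_cases h : f y < f x
    · simp [PySem.List.insertBy, h]
    · simp [PySem.List.insertBy, h, ih]

theorem pv_map_foldl_insertBy (f : Int → Int) (xs acc : List Int) :
    (xs.foldl (fun acc x => PySem.List.insertBy (fun a b => decide (f b < f a)) x acc) acc).map f
      = (xs.map f).foldl (fun acc x => PySem.List.insertBy (fun a b => decide (b < a)) x acc) (acc.map f) := by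
  induction xs generalizing acc with
  | nil => rfl
  | cons x t ih => simp only [List.foldl_cons, List.map_cons, ih, pv_map_insertBy]

-- sorting the values is the image of sorting the indices by the value key
theorem pv_sorted_map_id (f : Int → Int) (xs : List Int) :
    PySem.List.sorted (xs.map f) (fun x => x) true = (PySem.List.sorted xs f true).map f := by
  rw [PySem.List.sorted_rev_eq_foldl_insertBy, PySem.List.sorted_rev_eq_foldl_insertBy,
    pv_map_foldl_insertBy]
  rfl

-- stability of the reverse sort, in filter form: inserting into a descending list keeps
-- every equal-key class in arrival order
theorem pv_filter_insertBy (f : Int → Int) (v x : Int) (acc : List Int)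
    (h : acc.Pairwise (fun a b => f b ≤ f a)) :
    (PySem.List.insertBy (fun a b => decide (f b < f a)) x acc).filter (fun y => f y == v)
      = acc.filter (fun y => f y == v) ++ [x].filter (fun y => f y == v) := by
  induction acc with
  | nil => simp [PySem.List.insertBy]
  | cons a t ih =>
    rcases List.pairwise_cons.mp h with ⟨ha, ht⟩
    by_cases hx : f a < f x
    · -- x goes in front; nothing below can have key v if x has key v
      by_cases hv : f x = v
      · subst hv
        have hnil : (a :: t).filter (fun y => f y == f x) = [] := by
          apply List.filter_eq_nil_iff.mpr
          intro y hy
          rcases List.mem_cons.mp hy with rfl | hyt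
          · simp; omega
          · have := ha y hyt; simp; omega
        rw [show PySem.List.insertBy (fun a b => decide (f b < f a)) x (a :: t) = x :: a :: t from by
          simp [PySem.List.insertBy, hx]]
        rw [List.filter_cons_of_pos (by simp), hnil]
        simp
      · have : (f x == v) = false := by simp [hv]
        simp [PySem.List.insertBy, hx, List.filter_cons, this]
    · simp only [PySem.List.insertBy, decide_eq_true_eq, hx, if_false]
      simp only [List.filter_cons, ih ht]
      by_cases ha' : (f a == v)
      · simp [ha']
      · simp [ha']

theorem pv_filter_sorted_rev (f : Int → Int) (v : Int) (xs : List Int) :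
    (PySem.List.sorted xs f true).filter (fun y => f y == v) = xs.filter (fun y => f y == v) := by
  induction xs using List.reverseRecOn with
  | nil => rfl
  | append_singleton xs x ih =>
    have h1 : PySem.List.sorted (xs ++ [x]) f true
        = PySem.List.insertBy (fun a b => decide (f b < f a)) x (PySem.List.sorted xs f true) := by
      rw [PySem.List.sorted_rev_eq_foldl_insertBy, List.foldl_append,
        ← PySem.List.sorted_rev_eq_foldl_insertBy]
      rfl
    rw [h1, pv_filter_insertBy f v x _ (PySem.List.sorted_pairwise_rev xs f), ih,
      List.filter_append]

-- the first init loop produces a dict whose every getD-with-[] is []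
theorem pv_getD_foldl_insert_nil (key : Int → Int) (l : List Int)
    (d : PySem.Dict Int (List Int)) (h : ∀ w, d.getD w [] = ([] : List Int)) (v : Int) :
    (l.foldl (fun d i => d.insert (key i) []) d).getD v [] = [] := by
  induction l generalizing d with
  | nil => exact h v
  | cons i t ih =>
    refine ih _ (fun w => ?_)
    rw [PySem.Dict.getD_insert]
    split <;> [rfl; exact h w]

-- the second init loop groups the indices by key, each bucket in arrival order
theorem pv_getD_bucket (f : Int → Int) (idx : List Int) (d0 : PySem.Dict Int (List Int))
    (h0 : ∀ w, d0.getD w [] = ([] : List Int)) (v : Int) :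
    (idx.foldl (fun d i => d.modify (f i) [] (fun l => l ++ [i])) d0).getD v []
      = idx.filter (fun i => f i == v) := by
  have hmap : idx.foldl (fun d i => d.modify (f i) [] (fun l => l ++ [i])) d0
      = (idx.map (fun i => (f i, i))).foldl (fun d p => d.modify p.1 [] (fun l => l ++ [p.2])) d0 := by
    rw [List.foldl_map]
  rw [hmap, PySem.Dict.getD_foldl_modify_append, h0, List.filter_map]
  simp [Function.comp_def]

-- the main loop: after m of n steps the result dict is enumerate(order[:m]) and every
-- bucket holds the still-unserved indices of its key, in order
theorem pv_loop_invariant (order : List Int) (f : Int → Int) (csc : List Int)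
    (hcsc : ∀ (k : Nat) (hk : k < order.length),
      PySem.List.pyGetD csc (k : Int) 0 = f (order[k]'hk))
    (sp : PySem.Dict Int (List Int))
    (hsp : ∀ v, sp.getD v [] = order.filter (fun i => f i == v))
    (m : Nat) (hm : m ≤ order.length) :
    ((PySem.List.pyRange 0 (m : Int)).foldl
        (fun (st : PySem.Dict Int Int × PySem.Dict Int (List Int)) i =>
          (st.1.insert i ((st.2.getD (PySem.List.pyGetD csc i 0) []).headD 0),
           st.2.modify (PySem.List.pyGetD csc i 0) [] (fun l => l.drop 1)))
        (PySem.Dict.empty, sp)).1.items = PySem.List.enumerate (order.take m) ∧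
    ∀ v, ((PySem.List.pyRange 0 (m : Int)).foldl
        (fun (st : PySem.Dict Int Int × PySem.Dict Int (List Int)) i =>
          (st.1.insert i ((st.2.getD (PySem.List.pyGetD csc i 0) []).headD 0),
           st.2.modify (PySem.List.pyGetD csc i 0) [] (fun l => l.drop 1)))
        (PySem.Dict.empty, sp)).2.getD v []
      = (order.drop m).filter (fun i => f i == v) := by
  induction m with
  | zero =>
    rw [PySem.List.pyRange_one_eq_nil (by norm_num)]
    exact ⟨rfl, fun v => by simpa using hsp v⟩
  | succ m ih =>
    have hm' : m ≤ order.length := by omega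
    have hmlt : m < order.length := by omega
    obtain ⟨ih1, ih2⟩ := ih hm'
    have hsplit : PySem.List.pyRange 0 ((m : Int) + 1)
        = PySem.List.pyRange 0 (m : Int) ++ [(m : Int)] :=
      PySem.List.pyRange_one_succ_right (by positivity)
    rw [show ((m + 1 : Nat) : Int) = (m : Int) + 1 by push_cast; ring, hsplit, List.foldl_append,
      List.foldl_cons, List.foldl_nil]
    set st := (PySem.List.pyRange 0 (m : Int)).foldl
        (fun (st : PySem.Dict Int Int × PySem.Dict Int (List Int)) i =>
          (st.1.insert i ((st.2.getD (PySem.List.pyGetD csc i 0) []).headD 0),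
           st.2.modify (PySem.List.pyGetD csc i 0) [] (fun l => l.drop 1)))
        (PySem.Dict.empty, sp) with hst
    have hv : PySem.List.pyGetD csc (m : Int) 0 = f order[m] := hcsc m hmlt
    have hb : st.2.getD (f order[m]) []
        = order[m] :: (order.drop (m + 1)).filter (fun i => f i == f order[m]) := by
      rw [ih2, List.drop_eq_getElem_cons hmlt, List.filter_cons_of_pos (by simp)]
    have hfresh : st.1.contains ((m : Nat) : Int) = false := by
      have hk : st.1.keys = List.map (fun p => p.1) (PySem.List.enumerate (order.take m)) := by
        simp only [PySem.Dict.keys, ih1]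
      rw [PySem.Dict.contains_eq_decide_mem_keys, hk, PySem.List.map_fst_enumerate]
      simp only [PySem.List.mem_pyRange_one, List.length_take, decide_eq_false_iff_not]
      omega
    constructor
    · show (st.1.insert (m : Int) ((st.2.getD (PySem.List.pyGetD csc (m : Int) 0) []).headD 0)).items = _
      rw [hv, hb, List.headD_cons, PySem.Dict.items_insert_of_not_contains _ _ hfresh, ih1]
      have hget : order[m]?.toList = [order[m]] := by rw [List.getElem?_eq_getElem hmlt]; rfl
      rw [List.take_add_one, hget, PySem.List.enumerate_append]
      congr 1
      rw [PySem.List.enumerate_cons, PySem.List.enumerate_nil]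
      have : (0 : Int) + ((order.take m).length : Int) = (m : Int) := by
        simp only [List.length_take]; omega
      rw [this]
    · intro v
      show (st.2.modify (PySem.List.pyGetD csc (m : Int) 0) [] (fun l => l.drop 1)).getD v [] = _
      rw [hv, PySem.Dict.getD_modify]
      by_cases hvv : v = f order[m]
      · subst hvv
        rw [if_pos rfl, hb, List.drop_one, List.tail_cons]
      · rw [if_neg hvv, ih2, List.drop_eq_getElem_cons hmlt,
          List.filter_cons_of_neg (by simp; exact fun h => hvv h.symm)]

-- ===== VERDICT (by name: the statement is the Claim_ definition above) =====
theorem sorting_couriers_spec : Claim_equal_sorting_couriers := by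
  intro value _ _
  unfold Spec_sorting_couriers sorting_couriers sorting_couriers_alt
  cases hv : PySem.List.pyGet? value 2 with
  | none => rfl
  | some cs =>
    simp only
    set f : Int → Int := fun i => PySem.List.pyGetD cs i 0 with hf
    set idx := PySem.List.pyRange 0 (cs.length : Int) with hidx
    set order := PySem.List.sorted idx f true with horder
    -- the values list is the image of the index list under the key
    have hcsmap : cs = idx.map f := by
      rw [hidx, hf]
      exact (PySem.List.map_pyGetD_pyRange_zero' cs 0).symm
    -- A's sorted copy is order mapped through the key
    have hcopy : PySem.List.sorted cs (fun x => x) true = order.map f := by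
      rw [horder]
      conv_lhs => rw [hcsmap]
      exact pv_sorted_map_id f idx
    have hlen : order.length = cs.length := by
      rw [horder, PySem.List.length_sorted, hidx, PySem.List.length_pyRange_one]
      omega
    -- elementwise access into the sorted copy
    have hcsc : ∀ (k : Nat) (hk : k < order.length),
        PySem.List.pyGetD (PySem.List.sorted cs (fun x => x) true) (k : Int) 0 = f (order[k]'hk) := by
      intro k hk
      rw [hcopy, PySem.List.pyGetD_natCast,
        List.getD_eq_getElem _ _ (by simpa using hk), List.getElem_map]
    -- the buckets after the two init loops: the indices of each key, in arrival order
    have hsp : ∀ v,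
        (idx.foldl (fun d i => d.modify (f i) [] (fun l => l ++ [i]))
          (idx.foldl (fun d i => d.insert (f i) []) PySem.Dict.empty)).getD v []
        = order.filter (fun i => f i == v) := by
      intro v
      rw [pv_getD_bucket f idx _
        (pv_getD_foldl_insert_nil f idx PySem.Dict.empty (fun w => PySem.Dict.getD_empty w []))]
      rw [horder, pv_filter_sorted_rev]
    have hmain := pv_loop_invariant order f (PySem.List.sorted cs (fun x => x) true) hcsc _ hsp
      cs.length (le_of_eq hlen.symm)
    calc _ = PySem.List.enumerate (order.take cs.length) := hmain.1
      _ = PySem.List.enumerate order := by rw [← hlen, List.take_length]
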